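-- pv_equiv track=rewrite | github.com/txarlye/find_video_duplicates | src/services/Plex/plex_edition_creator.py | _clean_edition_name
-- ===== SOURCE A (Python) =====
-- def _clean_edition_name(edition_name: str) -> str:
--     """Limpia el nombre de la edición para evitar caracteres problemáticos"""
--     if not edition_name:
--         return "Edicion"
--
--     # Caracteres problemáticos en nombres de archivo
--     invalid_chars = ['<', '>', ':', '"', '|', '?', '*', '\\', '/']
--
--     clean_name = edition_name
--     for char in invalid_chars:
--         clean_name = clean_name.replace(char, '')
--
--     # Reemplazar espacios múltiples por uno solo
--     clean_name = ' '.join(clean_name.split())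
--
--     # Limitar longitud
--     if len(clean_name) > 50:
--         clean_name = clean_name[:50]
--
--     return clean_name.strip() or "Edicion"
-- ===== SOURCE B (Python) =====
-- def _clean_edition_name(edition_name: str) -> str:
--     """Single left-to-right pass: drop invalid chars and collapse whitespace with a
--     pending-space flag, then truncate and trim."""
--     if not edition_name:
--         return "Edicion"
--
--     invalid = set('<>:"|?*\\/')
--     out = []
--     pending_space = False
--     for c in edition_name:
--         if c in invalid:
--             continue
--         if c.isspace():
--             pending_space = True
--             continue
--         if pending_space and out:
--             out.append(' ')
--         pending_space = False
--         out.append(c)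
--
--     clean = ''.join(out[:50]).rstrip()
--     return clean or "Edicion"
-- ===== Notes on version B (the rewrite author's own statement) =====
-- stated objective: alternative
-- what changed: Replaces nine full-string replace passes plus split/join whitespace collapsing with one single left-to-right pass that skips invalid characters and collapses whitespace via a pending-space flag.
import Mathlib
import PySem

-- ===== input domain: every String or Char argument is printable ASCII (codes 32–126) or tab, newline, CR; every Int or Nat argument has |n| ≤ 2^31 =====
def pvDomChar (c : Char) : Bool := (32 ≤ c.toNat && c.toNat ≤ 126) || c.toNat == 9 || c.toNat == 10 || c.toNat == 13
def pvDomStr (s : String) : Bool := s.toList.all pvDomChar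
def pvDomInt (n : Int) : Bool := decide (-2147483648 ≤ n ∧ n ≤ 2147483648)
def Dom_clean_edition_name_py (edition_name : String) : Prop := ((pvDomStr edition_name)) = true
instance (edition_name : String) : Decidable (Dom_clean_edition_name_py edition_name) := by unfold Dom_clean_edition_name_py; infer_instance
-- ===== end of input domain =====

-- B replaces A's nine whole-string replace passes plus split/join whitespace collapsing by one
-- single left-to-right pass with a pending-space flag; same return value everywhere (alternative).

-- ===== PORT A =====
def clean_edition_name_py (edition_name : String) : String :=
  if edition_name = "" then "Edicion"
  else
    let invalid_chars : List String := ["<", ">", ":", "\"", "|", "?", "*", "\\", "/"]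
    let clean_name := invalid_chars.foldl (fun cn ch => PySem.Str.replace cn ch "") edition_name
    let clean_name := PySem.Str.join " " (PySem.Str.split₀ clean_name)
    let clean_name := if PySem.Str.len clean_name > 50 then PySem.Str.slice clean_name none (some 50) else clean_name
    let r := PySem.Str.strip clean_name
    if r = "" then "Edicion" else r

-- ===== PORT B =====
def pvInvalidSet : PySem.Set Char := PySem.Set.ofList ['<', '>', ':', '"', '|', '?', '*', '\\', '/']

-- one loop iteration of Source B: skip invalid chars, record whitespace in the pending flag, emit chars
def pvBStep (st : List Char × Bool) (c : Char) : List Char × Bool :=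
  if c ∈ pvInvalidSet then st
  else if PySem.Chars.isspace c then (st.1, true)
  else if st.2 && !st.1.isEmpty then (st.1 ++ [' ', c], false)
  else (st.1 ++ [c], false)

def clean_edition_name_py_alt (edition_name : String) : String :=
  if edition_name = "" then "Edicion"
  else
    let st := edition_name.toList.foldl pvBStep ([], false)
    let clean := PySem.Chars.rstrip (st.1.take 50)
    if clean = [] then "Edicion" else String.ofList clean

-- ===== PRECONDITION & SPEC =====
def Spec_clean_edition_name_py (edition_name : String) (out : String) : Prop := out = clean_edition_name_py_alt edition_name
instance (edition_name : String) (out : String) : Decidable (Spec_clean_edition_name_py edition_name out) := by unfold Spec_clean_edition_name_py; infer_instance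

-- ===== CLAIM (what is proved, stated in full; the proofs are below) =====
def Claim_equal_clean_edition_name_py : Prop := ∀ (edition_name : String), Dom_clean_edition_name_py edition_name → Spec_clean_edition_name_py edition_name (clean_edition_name_py edition_name)

-- ===== LEMMAS AND PROOFS =====

-- the character-keeping predicate both programs implement
def pvKeep (c : Char) : Bool := decide (c ∉ (['<', '>', ':', '"', '|', '?', '*', '\\', '/'] : List Char))

-- B's step once invalid characters are gone
def pvStep (st : List Char × Bool) (c : Char) : List Char × Bool :=
  if PySem.Chars.isspace c then (st.1, true)
  else if st.2 && !st.1.isEmpty then (st.1 ++ [' ', c], false)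
  else (st.1 ++ [c], false)

lemma pvReplace_go_single (c : Char) : ∀ (fuel : Nat) (l acc : List Char), l.length ≤ fuel →
    PySem.Chars.replace.go [c] [] fuel l acc = acc.reverse ++ l.filter (fun d => !(d == c)) := by
  intro fuel
  induction fuel with
  | zero =>
    intro l acc h
    have : l = [] := List.eq_nil_of_length_eq_zero (Nat.le_zero.mp h)
    subst this
    simp [PySem.Chars.replace.go]
  | succ n ih =>
    intro l acc h
    cases l with
    | nil => simp [PySem.Chars.replace.go]
    | cons d t =>
      rw [PySem.Chars.replace.go]
      by_cases hd : c = d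
      · subst hd
        simp only [List.isPrefixOf, beq_self_eq_true, Bool.true_and, if_true]
        simp only [List.length_cons, List.length_nil, List.drop_succ_cons, List.drop_zero,
          List.reverse_nil, List.nil_append]
        rw [ih t acc (by simpa using h)]
        simp
      · have : ([c].isPrefixOf (d :: t)) = false := by
          simp [List.isPrefixOf, hd]
        rw [this]
        simp only [Bool.false_eq_true, if_false]
        rw [ih t (d :: acc) (by simpa using h)]
        simp [Ne.symm hd, beq_eq_false_iff_ne]

lemma pvReplace_single (c : Char) (s : List Char) :
    PySem.Chars.replace s [c] [] = s.filter (fun d => !(d == c)) := by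
  rw [PySem.Chars.replace]
  simp only [List.isEmpty_cons, Bool.false_eq_true, if_false]
  exact pvReplace_go_single c s.length s [] (le_refl _)

lemma pvChain_eq_filter (s : String) :
    ((["<", ">", ":", "\"", "|", "?", "*", "\\", "/"] : List String).foldl
      (fun cn ch => PySem.Str.replace cn ch "") s).toList = s.toList.filter pvKeep := by
  have e1 : "<".toList = ['<'] := by decide
  have e2 : ">".toList = ['>'] := by decide
  have e3 : ":".toList = [':'] := by decide
  have e4 : "\"".toList = ['"'] := by decide
  have e5 : "|".toList = ['|'] := by decide
  have e6 : "?".toList = ['?'] := by decide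
  have e7 : "*".toList = ['*'] := by decide
  have e8 : "\\".toList = ['\\'] := by decide
  have e9 : "/".toList = ['/'] := by decide
  have e0 : "".toList = [] := by decide
  simp only [List.foldl, PySem.Str.toList_replace, e1, e2, e3, e4, e5, e6, e7, e8, e9, e0]
  simp only [pvReplace_single, List.filter_filter]
  apply List.filter_congr
  intro c _
  by_cases h : c ∈ (['<', '>', ':', '"', '|', '?', '*', '\\', '/'] : List Char)
  · simp only [List.mem_cons, List.not_mem_nil, or_false] at h
    rcases h with rfl|rfl|rfl|rfl|rfl|rfl|rfl|rfl|rfl <;> decide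
  · simp only [List.mem_cons, not_or, List.not_mem_nil] at h
    simp [pvKeep, beq_eq_false_iff_ne, List.mem_cons,
      h.1, h.2.1, h.2.2.1, h.2.2.2.1, h.2.2.2.2.1,
      h.2.2.2.2.2.1, h.2.2.2.2.2.2.1, h.2.2.2.2.2.2.2.1, h.2.2.2.2.2.2.2.2.1]

lemma pvBStep_eq (st : List Char × Bool) (c : Char) :
    pvBStep st c = if pvKeep c then pvStep st c else st := by
  unfold pvBStep pvStep pvKeep pvInvalidSet
  by_cases h : c ∈ (['<', '>', ':', '"', '|', '?', '*', '\\', '/'] : List Char)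
  · simp [PySem.Set.mem_ofList, h]
  · simp [PySem.Set.mem_ofList, h]

lemma pvFoldB_eq_filter : ∀ (l : List Char) (st : List Char × Bool),
    l.foldl pvBStep st = (l.filter pvKeep).foldl pvStep st := by
  intro l
  induction l with
  | nil => intro st; rfl
  | cons c t ih =>
    intro st
    rw [List.foldl_cons, List.filter_cons, pvBStep_eq]
    by_cases h : pvKeep c = true
    · simp only [h, if_true, List.foldl_cons]; exact ih _
    · simp only [h, Bool.false_eq_true, if_false]
      exact ih _

-- the string a run of Source B's loop from state (acc-of-words, current word) denotes
def pvJ (acc : List (List Char)) (cur : List Char) : List Char :=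
  PySem.Chars.join [' '] acc.reverse ++
    (if cur = [] then [] else (if acc = [] then ([] : List Char) else [' ']) ++ cur.reverse)

lemma pvIc (sep a b : List Char) (u : List (List Char)) :
    List.intercalate sep (a :: b :: u) = a ++ sep ++ List.intercalate sep (b :: u) := by
  simp [List.intercalate, List.intersperse]

lemma pvJoin_append_singleton (xs : List (List Char)) (y : List Char) :
    PySem.Chars.join [' '] (xs ++ [y]) =
      PySem.Chars.join [' '] xs ++ (if xs = [] then ([] : List Char) else [' ']) ++ y := by
  induction xs with
  | nil => simp [PySem.Chars.join, List.intercalate]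
  | cons a t ih =>
    cases t with
    | nil => simp [PySem.Chars.join, List.intercalate]
    | cons b u =>
      simp only [List.cons_append, PySem.Chars.join, pvIc] at *
      simp [ih]

lemma pvJoin_ne_nil (ws : List (List Char)) (h : ws ≠ []) (hw : ∀ w ∈ ws, w ≠ []) :
    PySem.Chars.join [' '] ws ≠ [] := by
  cases ws with
  | nil => exact absurd rfl h
  | cons a t =>
    have ha : a ≠ [] := hw a (List.mem_cons_self ..)
    cases t with
    | nil => simpa [PySem.Chars.join, List.intercalate] using ha
    | cons b u =>
      simp only [PySem.Chars.join, pvIc]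
      intro hcon
      simp [List.append_eq_nil_iff] at hcon

lemma pvJ_push (acc : List (List Char)) (cur : List Char) (h : cur ≠ []) :
    pvJ (cur.reverse :: acc) [] = pvJ acc cur := by
  simp only [pvJ, List.reverse_cons, pvJoin_append_singleton, List.reverse_eq_nil_iff,
    if_neg h]
  simp [List.append_assoc]

lemma pvMain : ∀ (l cur : List Char) (acc : List (List Char)) (p : Bool),
    (cur = [] → acc ≠ [] → p = true) → (cur ≠ [] → p = false) → (∀ w ∈ acc, w ≠ []) →
    (l.foldl pvStep (pvJ acc cur, p)).1 = PySem.Chars.join [' '] (PySem.Chars.split₀.go l cur acc) := by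
  intro l
  induction l with
  | nil =>
    intro cur acc p h1 h2 hw
    rw [PySem.Chars.split₀.go]
    by_cases hc : cur = []
    · subst hc
      simp [pvJ]
    · simp only [List.isEmpty_iff, hc, if_false, List.foldl_nil]
      rw [List.reverse_cons, pvJoin_append_singleton]
      simp only [pvJ, List.reverse_eq_nil_iff, if_neg hc]
      by_cases ha : acc = [] <;> simp [ha]
  | cons c t ih =>
    intro cur acc p h1 h2 hw
    rw [PySem.Chars.split₀.go, List.foldl_cons]
    by_cases hs : PySem.Chars.isspace c = true
    · simp only [hs, if_true, pvStep]
      by_cases hc : cur = []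
      · subst hc
        simp only [List.isEmpty_nil, if_true]
        exact ih [] acc true (fun _ _ => rfl) (fun hh => absurd rfl hh) hw
      · simp only [List.isEmpty_iff, hc, if_false]
        rw [← pvJ_push acc cur hc]
        exact ih [] (cur.reverse :: acc) true (fun _ _ => rfl) (fun hh => absurd rfl hh)
          (by intro w hwmem
              rcases List.mem_cons.mp hwmem with rfl | hwmem
              · simpa using hc
              · exact hw w hwmem)
    · have key : pvStep (pvJ acc cur, p) c = (pvJ acc (c :: cur), false) := by
        simp only [pvStep, hs, Bool.false_eq_true, if_false]
        by_cases hc : cur = []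
        · subst hc
          by_cases ha : acc = []
          · subst ha
            simp [pvJ]
          · have hp : p = true := h1 rfl ha
            have hj : PySem.Chars.join [' '] acc.reverse ≠ [] :=
              pvJoin_ne_nil acc.reverse (by simpa using ha)
                (fun w hwmem => hw w (List.mem_reverse.mp hwmem))
            have hne : pvJ acc [] ≠ [] := by simpa [pvJ] using hj
            rw [if_pos (by simp [hp, hne] :
              ((p && !(pvJ acc []).isEmpty) = true))]
            simp [pvJ, ha]
        · have hp : p = false := h2 hc
          rw [if_neg (by simp [hp] : ¬ ((p && !(pvJ acc cur).isEmpty) = true))]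
          simp [pvJ, hc, List.append_assoc]
      simp only [hs, Bool.false_eq_true, if_false, key]
      exact ih (c :: cur) acc false
        (fun hh _ => absurd hh (by simp)) (fun _ => rfl) hw

lemma pvHead_nonspace : ∀ (l out : List Char) (p : Bool),
    (out = [] ∨ ∃ d t, out = d :: t ∧ PySem.Chars.isspace d = false) →
    ((l.foldl pvStep (out, p)).1 = [] ∨
      ∃ d t, (l.foldl pvStep (out, p)).1 = d :: t ∧ PySem.Chars.isspace d = false) := by
  intro l
  induction l with
  | nil => intro out p h; exact h
  | cons c t ih =>
    intro out p h
    rw [List.foldl_cons]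
    by_cases hs : PySem.Chars.isspace c = true
    · simp only [pvStep, hs, if_true]
      exact ih out true h
    · simp only [pvStep, hs, Bool.false_eq_true, if_false]
      rcases h with rfl | ⟨d, u, rfl, hd⟩
      · simp only [List.isEmpty_nil, Bool.not_true, Bool.and_false]
        simp only [Bool.false_eq_true, if_false, List.nil_append]
        exact ih [c] false (Or.inr ⟨c, [], rfl, by simpa using hs⟩)
      · by_cases hp : (p && !(d :: u).isEmpty) = true
        · rw [if_pos hp]
          exact ih _ false (Or.inr ⟨d, u ++ [' ', c], by simp, hd⟩)
        · rw [if_neg hp]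
          exact ih _ false (Or.inr ⟨d, u ++ [c], by simp, hd⟩)

lemma pvStrip_eq_rstrip (x : List Char)
    (h : x = [] ∨ ∃ d t, x = d :: t ∧ PySem.Chars.isspace d = false) :
    PySem.Chars.strip x = PySem.Chars.rstrip x := by
  rcases h with rfl | ⟨d, t, rfl, hd⟩
  · rfl
  · simp [PySem.Chars.strip, PySem.Chars.lstrip, hd]

lemma pvTake_head (x : List Char) (n : Nat)
    (h : x = [] ∨ ∃ d t, x = d :: t ∧ PySem.Chars.isspace d = false) (hn : n ≠ 0) :
    x.take n = [] ∨ ∃ d t, x.take n = d :: t ∧ PySem.Chars.isspace d = false := by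
  rcases h with rfl | ⟨d, t, rfl, hd⟩
  · left; simp
  · right
    cases n with
    | zero => exact absurd rfl hn
    | succ m => exact ⟨d, t.take m, by simp, hd⟩

-- ===== VERDICT (by name: the statement is the Claim_ definition above) =====
theorem clean_edition_name_py_spec : Claim_equal_clean_edition_name_py := by
  unfold Claim_equal_clean_edition_name_py Spec_clean_edition_name_py
  intro s _
  unfold clean_edition_name_py clean_edition_name_py_alt
  by_cases hs : s = ""
  · simp [hs]
  · rw [if_neg hs, if_neg hs]
    -- names for the intermediate values
    set fc : List Char := s.toList.filter pvKeep with hfc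
    set w : List Char := PySem.Chars.join [' '] (PySem.Chars.split₀ fc) with hwdef
    -- B's loop computes w
    have hfoldB : (s.toList.foldl pvBStep ([], false)).1 = w := by
      rw [pvFoldB_eq_filter]
      have h0 : pvJ [] [] = ([] : List Char) := by simp [pvJ, PySem.Chars.join, List.intercalate]
      have := pvMain fc [] [] false (fun _ hh => absurd rfl hh) (fun hh => absurd rfl hh)
        (by intro w hw; cases hw)
      rw [h0] at this
      rw [this, hwdef, PySem.Chars.split₀]
    -- w starts with a non-space character (or is empty)
    have hwhead : w = [] ∨ ∃ d t, w = d :: t ∧ PySem.Chars.isspace d = false := by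
      have hh := pvHead_nonspace fc [] false (Or.inl rfl)
      rw [← pvFoldB_eq_filter, hfoldB] at hh
      exact hh
    -- A's chain + join computes w as well
    have hA : (PySem.Str.join " " (PySem.Str.split₀
        ((["<", ">", ":", "\"", "|", "?", "*", "\\", "/"] : List String).foldl
          (fun cn ch => PySem.Str.replace cn ch "") s))).toList = w := by
      rw [PySem.Str.toList_join, PySem.Str.split₀_map_toList, pvChain_eq_filter]
      have : (" " : String).toList = [' '] := by decide
      rw [this, hwdef]
    set cn1 := PySem.Str.join " " (PySem.Str.split₀
        ((["<", ">", ":", "\"", "|", "?", "*", "\\", "/"] : List String).foldl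
          (fun cn ch => PySem.Str.replace cn ch "") s)) with hcn1
    -- the conditional slice is a take 50
    have hslice : (if PySem.Str.len cn1 > 50 then PySem.Str.slice cn1 none (some 50) else cn1).toList
        = w.take 50 := by
      by_cases hlen : PySem.Str.len cn1 > 50
      · rw [if_pos hlen, PySem.Str.toList_slice, PySem.Chars.slice_eq_listSlice,
          PySem.List.slice_to _ (by norm_num)]
        rw [hA]
        rfl
      · rw [if_neg hlen]
        have hw50 : w.length ≤ 50 := by
          simp only [PySem.Str.len, not_lt, hA] at hlen
          exact_mod_cast hlen
        rw [List.take_of_length_le hw50, hA]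
    -- A's stripped result equals B's clean list
    have hr : (PySem.Str.strip (if PySem.Str.len cn1 > 50 then PySem.Str.slice cn1 none (some 50) else cn1)).toList
        = PySem.Chars.rstrip ((s.toList.foldl pvBStep ([], false)).1.take 50) := by
      rw [PySem.Str.toList_strip, hslice, hfoldB]
      exact pvStrip_eq_rstrip _ (pvTake_head w 50 hwhead (by norm_num))
    -- conclude, comparing the two final `or "Edicion"` branches
    set clean := PySem.Chars.rstrip ((s.toList.foldl pvBStep ([], false)).1.take 50) with hclean
    by_cases hz : clean = []
    · rw [if_pos hz]
      rw [if_pos (by rw [← String.toList_eq_nil_iff, hr, hz])]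
    · rw [if_neg hz]
      rw [if_neg (by intro hcon; apply hz; rw [← hr, hcon]; decide)]
      have hfin : PySem.Str.strip
          (if PySem.Str.len cn1 > 50 then PySem.Str.slice cn1 none (some 50) else cn1)
            = String.ofList clean := by
        rw [← hr, String.ofList_toList]
      exact hfin
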